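-- pv_equiv track=rewrite | github.com/yota0227/aws_private_rag-public- | test_rtl/Sample/find_edc_paths.py | find_edc_paths
-- ===== SOURCE A (Python) =====
-- def find_edc_paths(graph, top, keyword, defined_modules):
--     """
--     DFS from top. Only follow edges to modules that are actually defined
--     in the source. Report paths that end at a module whose name contains
--     `keyword`.
--     """
--     keyword = keyword.lower()
--     found_paths = []
--
--     def dfs(module, path, visited):
--         is_edc = keyword in module.lower()
--         if is_edc:
--             found_paths.append(list(path))
--
--         if module in visited:
--             return
--         visited = visited | {module}
--
--         for child_mod, inst_name in graph.get(module, []):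
--             # Prune: only recurse into modules that are actually defined
--             if child_mod in defined_modules:
--                 dfs(child_mod, path + [(child_mod, inst_name)], visited)
--
--     dfs(top, [(top, top)], set())
--     return found_paths
-- ===== SOURCE B (Python) =====
-- def find_edc_paths(graph, top, keyword, defined_modules):
--     """Two staged passes: enumerate the pruned DFS visit sequence with an
--     explicit stack (no keyword logic), then filter it for keyword matches."""
--     visits = []
--     stack = [(top, [(top, top)], frozenset())]
--     while stack:
--         module, path, visited = stack.pop()
--         visits.append((module, path))
--         if module in visited:
--             continue
--         visited = visited | {module}
--         for child_mod, inst_name in reversed(graph.get(module, [])):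
--             if child_mod in defined_modules:
--                 stack.append((child_mod, path + [(child_mod, inst_name)], visited))
--     kw = keyword.lower()
--     return [list(path) for module, path in visits if kw in module.lower()]
-- ===== Notes on version B (the rewrite author's own statement) =====
-- stated objective: alternative
-- what changed: A's recursive DFS closure that checks the keyword and appends matching paths inline is replaced by two staged passes: an iterative explicit-stack traversal that only records the DFS visit sequence (module, path) with no keyword logic, followed by a separate filter pass extracting the paths whose module name contains the lowercased keyword.
import Mathlib
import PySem

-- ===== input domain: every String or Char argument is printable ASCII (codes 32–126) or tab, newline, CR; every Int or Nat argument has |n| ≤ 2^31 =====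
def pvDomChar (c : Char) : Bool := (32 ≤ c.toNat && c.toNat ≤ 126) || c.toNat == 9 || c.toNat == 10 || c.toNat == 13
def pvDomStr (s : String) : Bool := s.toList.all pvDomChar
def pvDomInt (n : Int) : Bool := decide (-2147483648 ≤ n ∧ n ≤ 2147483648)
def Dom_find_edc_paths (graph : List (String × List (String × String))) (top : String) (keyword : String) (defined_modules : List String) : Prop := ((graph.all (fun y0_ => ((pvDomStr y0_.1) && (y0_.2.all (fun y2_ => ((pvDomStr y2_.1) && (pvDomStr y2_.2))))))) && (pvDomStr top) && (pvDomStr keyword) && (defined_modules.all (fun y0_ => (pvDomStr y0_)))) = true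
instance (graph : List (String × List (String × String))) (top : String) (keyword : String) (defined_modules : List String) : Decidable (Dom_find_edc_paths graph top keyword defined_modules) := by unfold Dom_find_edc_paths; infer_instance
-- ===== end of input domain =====

-- B replaces A's recursive DFS with inline keyword filtering by two staged passes:
-- an explicit-stack traversal recording the DFS visit sequence, then a separate
-- filter extracting keyword-matching paths (objective: alternative).

-- ===== PORT A =====
-- `pvUniv graph top` lists top and every child module name occurring in graph: the
-- DFS only ever visits members of this list, so its length bounds the recursion depth
-- and `(length + 1)` fuel makes the structural recursion total without ever being hit.
def pvUniv (graph : List (String × List (String × String))) (top : String) : List String :=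
  top :: graph.flatMap (fun p => p.2.map Prod.fst)

-- literal transliteration of A's inner `dfs` (found_paths threaded as the foldl
-- accumulator, in append order); fuel only makes the recursion structural.
def pvDfsA (graph : List (String × List (String × String))) (keyword : String)
    (defined_modules : List String) :
    Nat → String → List (String × String) → PySem.Set String → List (List (String × String))
  | 0, _, _, _ => []  -- unreachable with the fuel supplied below
  | fuel+1, m, path, visited =>
    let hit : List (List (String × String)) :=
      if PySem.Str.isIn keyword (PySem.Str.lower m) then [path] else []
    if PySem.Set.contains visited m then hit
    else
      let visited2 := PySem.Set.add visited m
      ((PySem.Dict.mk graph).getD m []).foldl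
        (fun acc ci =>
          if defined_modules.contains ci.1 then
            acc ++ pvDfsA graph keyword defined_modules fuel ci.1 (path ++ [ci]) visited2
          else acc)
        hit

def find_edc_paths (graph : List (String × List (String × String))) (top : String) (keyword : String) (defined_modules : List String) : List (List (String × String)) :=
  pvDfsA graph (PySem.Str.lower keyword) defined_modules
    ((pvUniv graph top).length + 1) top [(top, top)] PySem.Set.empty

-- ===== PORT B =====
-- total number of child edges in graph (sizes B's fuel, which is never hit)
def pvE (graph : List (String × List (String × String))) : Nat :=
  (graph.flatMap (fun p => p.2)).length

-- Stage 1 of Source B: the while-loop over the explicit stack, recording the visit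
-- sequence.  The Lean stack list is the Python stack REVERSED (head = top), so
-- `stack.pop()` is matching on the head, and `for … in reversed(children):
-- if defined: stack.append(…)` is the foldr below.  The fuel bounds the number of
-- loop iterations and is never hit for the value supplied below.
def pvVisitLoop (graph : List (String × List (String × String)))
    (defined_modules : List String) :
    Nat → List (String × List (String × String) × PySem.Set String) →
    List (String × List (String × String)) → List (String × List (String × String))
  | 0, _, visits => visits  -- unreachable with the fuel supplied below
  | _+1, [], visits => visits
  | fuel+1, (m, path, visited) :: rest, visits =>
    let visits2 := visits ++ [(m, path)]
    if PySem.Set.contains visited m then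
      pvVisitLoop graph defined_modules fuel rest visits2
    else
      let visited2 := PySem.Set.add visited m
      pvVisitLoop graph defined_modules fuel
        (((PySem.Dict.mk graph).getD m []).foldr
          (fun ci st =>
            if defined_modules.contains ci.1 then (ci.1, path ++ [ci], visited2) :: st else st)
          rest)
        visits2

def find_edc_paths_alt (graph : List (String × List (String × String))) (top : String) (keyword : String) (defined_modules : List String) : List (List (String × String)) :=
  let visits := pvVisitLoop graph defined_modules
    ((pvE graph + 2) ^ (pvUniv graph top).length + 1)
    [(top, [(top, top)], PySem.Set.empty)] []
  let kw := PySem.Str.lower keyword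
  -- stage 2 of Source B: the list comprehension filtering visits by keyword
  visits.filterMap
    (fun e => if PySem.Str.isIn kw (PySem.Str.lower e.1) then some e.2 else none)

-- ===== PRECONDITION & SPEC =====
def Spec_find_edc_paths (graph : List (String × List (String × String))) (top : String) (keyword : String) (defined_modules : List String) (out : List (List (String × String))) : Prop := out = find_edc_paths_alt graph top keyword defined_modules
instance (graph : List (String × List (String × String))) (top : String) (keyword : String) (defined_modules : List String) (out : List (List (String × String))) : Decidable (Spec_find_edc_paths graph top keyword defined_modules out) := by unfold Spec_find_edc_paths; infer_instance

-- ===== CLAIM (what is proved, stated in full; the proofs are below) =====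
def Claim_equal_find_edc_paths : Prop := ∀ (graph : List (String × List (String × String))) (top : String) (keyword : String) (defined_modules : List String), Dom_find_edc_paths graph top keyword defined_modules → Spec_find_edc_paths graph top keyword defined_modules (find_edc_paths graph top keyword defined_modules)

-- ===== LEMMAS AND PROOFS =====

-- the recursive visit sequence (proof-only intermediate between the two ports)
def pvVisitsRec (graph : List (String × List (String × String)))
    (defined_modules : List String) :
    Nat → String → List (String × String) → PySem.Set String →
    List (String × List (String × String))
  | 0, _, _, _ => []
  | fuel+1, m, path, visited =>
    if PySem.Set.contains visited m then [(m, path)]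
    else
      (m, path) ::
        ((PySem.Dict.mk graph).getD m []).flatMap
          (fun ci =>
            if defined_modules.contains ci.1 then
              pvVisitsRec graph defined_modules fuel ci.1 (path ++ [ci])
                (PySem.Set.add visited m)
            else [])

-- number of universe members not yet visited (the decreasing quantity of the DFS)
def pvFree (graph : List (String × List (String × String))) (top : String)
    (v : PySem.Set String) : Nat :=
  ((pvUniv graph top).filter (fun x => !(PySem.Set.contains v x))).length

-- termination measure of B's whole stack
def pvMsum (graph : List (String × List (String × String))) (top : String)
    (stack : List (String × List (String × String) × PySem.Set String)) : Nat :=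
  (stack.map (fun e => (pvE graph + 2) ^ pvFree graph top e.2.2)).sum

theorem pv_mem_of_get? (l : List (String × List (String × String))) (k : String)
    (v : List (String × String)) (h : (PySem.Dict.mk l).get? k = some v) : (k, v) ∈ l := by
  induction l with
  | nil => simp [PySem.Dict.get?] at h
  | cons hd tl ih =>
    obtain ⟨k', v'⟩ := hd
    rw [PySem.Dict.get?_mk_cons] at h
    by_cases hk : (k' == k) = true
    · simp [hk] at h
      have hk' : k' = k := by simpa using hk
      subst hk'
      simp [h]
    · simp [hk] at h
      exact List.mem_cons_of_mem _ (ih h)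

theorem pv_children_mem (graph : List (String × List (String × String))) (top m : String)
    (ci : String × String) (hci : ci ∈ (PySem.Dict.mk graph).getD m []) :
    ci.1 ∈ pvUniv graph top := by
  rw [PySem.Dict.getD_eq_get?_getD] at hci
  cases hget : (PySem.Dict.mk graph).get? m with
  | none => rw [hget] at hci; simp at hci
  | some cs =>
    rw [hget] at hci
    simp at hci
    have hmem := pv_mem_of_get? graph m cs hget
    have : ci.1 ∈ graph.flatMap (fun p => p.2.map Prod.fst) :=
      List.mem_flatMap.mpr ⟨(m, cs), hmem, List.mem_map_of_mem hci⟩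
    exact List.mem_cons_of_mem _ this

theorem pv_children_len (graph : List (String × List (String × String))) (m : String) :
    ((PySem.Dict.mk graph).getD m []).length ≤ pvE graph := by
  rw [PySem.Dict.getD_eq_get?_getD]
  cases hget : (PySem.Dict.mk graph).get? m with
  | none => simp
  | some cs =>
    have hmem := pv_mem_of_get? graph m cs hget
    have h1 : cs.length ≤ (graph.map (fun p => p.2.length)).sum :=
      List.le_sum_of_mem (List.mem_map_of_mem (f := fun p => p.2.length) hmem)
    simpa [pvE, List.length_flatMap] using h1

theorem pv_filter_le {α : Type} (l : List α) (p q : α → Bool)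
    (himp : ∀ x, q x = true → p x = true) :
    (l.filter q).length ≤ (l.filter p).length := by
  induction l with
  | nil => simp
  | cons hd tl ih =>
    by_cases hq : q hd = true
    · simp [hq, himp hd hq]; omega
    · simp only [Bool.not_eq_true] at hq
      by_cases hp : p hd = true <;> simp [hq, hp] <;> omega

theorem pv_filter_lt {α : Type} (l : List α) (p q : α → Bool)
    (himp : ∀ x, q x = true → p x = true) (m : α) (hm : m ∈ l) (hp : p m = true)
    (hq : q m = false) : (l.filter q).length < (l.filter p).length := by
  induction l with
  | nil => simp at hm
  | cons hd tl ih =>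
    rcases List.mem_cons.mp hm with h | h
    · subst h
      have hle := pv_filter_le tl p q himp
      simp [hp, hq]
      omega
    · have hlt := ih h
      by_cases hqh : q hd = true
      · simp [hqh, himp hd hqh]; omega
      · simp only [Bool.not_eq_true] at hqh
        by_cases hph : p hd = true <;> simp [hqh, hph] <;> omega

theorem pv_free_lt (graph : List (String × List (String × String))) (top m : String)
    (v : PySem.Set String) (hm : m ∈ pvUniv graph top)
    (hv : PySem.Set.contains v m = false) :
    pvFree graph top (PySem.Set.add v m) < pvFree graph top v := by
  have hv' : m ∉ v := by simpa using hv
  refine pv_filter_lt _ _ _ ?_ m hm ?_ ?_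
  · intro x hx
    simp [PySem.Set.add, hv'] at hx ⊢
    tauto
  · simp [hv']
  · simp [PySem.Set.add, hv']

-- fuel irrelevance for the visit sequence: any two fuels above pvFree agree
theorem pv_visits_fuel (graph : List (String × List (String × String))) (top : String)
    (defined_modules : List String) :
    ∀ f1 f2 (m : String) (path : List (String × String)) (v : PySem.Set String),
      m ∈ pvUniv graph top → pvFree graph top v < f1 → pvFree graph top v < f2 →
      pvVisitsRec graph defined_modules f1 m path v
        = pvVisitsRec graph defined_modules f2 m path v := by
  intro f1
  induction f1 with
  | zero => intro f2 m path v _ h1 _; omega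
  | succ n ih =>
    intro f2 m path v hm h1 h2
    cases f2 with
    | zero => omega
    | succ k =>
      simp only [pvVisitsRec]
      by_cases hcont : PySem.Set.contains v m = true
      · simp only [hcont, if_true]
      · simp only [Bool.not_eq_true] at hcont
        simp only [hcont, Bool.false_eq_true, if_false, List.cons.injEq, true_and]
        apply List.flatMap_congr
        intro ci hci
        by_cases hdm : defined_modules.contains ci.1 = true
        · simp only [hdm, if_true]
          have hciu := pv_children_mem graph top m ci hci
          have hlt := pv_free_lt graph top m v hm hcont
          exact ih k ci.1 (path ++ [ci]) (PySem.Set.add v m) hciu (by omega) (by omega)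
        · simp only [Bool.not_eq_true] at hdm
          simp only [hdm, Bool.false_eq_true, if_false]

-- A's DFS result is exactly the keyword filter of the visit sequence
theorem pv_dfsA_filterMap (graph : List (String × List (String × String)))
    (keyword : String) (defined_modules : List String) :
    ∀ fuel (m : String) (path : List (String × String)) (v : PySem.Set String),
      pvDfsA graph keyword defined_modules fuel m path v
        = (pvVisitsRec graph defined_modules fuel m path v).filterMap
            (fun e => if PySem.Str.isIn keyword (PySem.Str.lower e.1) then some e.2 else none) := by
  intro fuel
  induction fuel with
  | zero => intro m path v; simp [pvDfsA, pvVisitsRec]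
  | succ n ih =>
    intro m path v
    simp only [pvDfsA, pvVisitsRec]
    by_cases hcont : PySem.Set.contains v m = true
    · simp only [hcont, if_true]
      by_cases hkw : PySem.Chars.isIn keyword.toList (PySem.Chars.lower m.toList) = true <;>
        simp [PySem.Str.isIn, PySem.Str.lower, hkw]
    · simp only [Bool.not_eq_true] at hcont
      simp only [hcont, Bool.false_eq_true, if_false]
      rw [PySem.List.foldl_congr_mem _ _
        (fun acc (ci : String × String) => acc ++
          (if defined_modules.contains ci.1 = true then
            pvDfsA graph keyword defined_modules n ci.1 (path ++ [ci])
              (PySem.Set.add v m) else []))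
        _
        (by intro acc ci _
            by_cases h : defined_modules.contains ci.1 = true
            · simp only [h, if_true]
            · simp only [Bool.not_eq_true] at h
              simp only [h, Bool.false_eq_true, if_false, List.append_nil])]
      rw [PySem.List.foldl_append_eq_flatMap]
      rw [List.filterMap_cons]
      have hflat : (((PySem.Dict.mk graph).getD m []).flatMap
            (fun ci => if defined_modules.contains ci.1 = true then
              pvVisitsRec graph defined_modules n ci.1 (path ++ [ci])
                (PySem.Set.add v m) else [])).filterMap
            (fun e => if PySem.Str.isIn keyword (PySem.Str.lower e.1) then some e.2 else none)
          = ((PySem.Dict.mk graph).getD m []).flatMap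
            (fun ci => if defined_modules.contains ci.1 = true then
              pvDfsA graph keyword defined_modules n ci.1 (path ++ [ci])
                (PySem.Set.add v m) else []) := by
        induction ((PySem.Dict.mk graph).getD m []) with
        | nil => simp
        | cons hd tl ihl =>
          simp only [List.flatMap_cons, List.filterMap_append, ihl]
          congr 1
          by_cases h : defined_modules.contains hd.1 = true
          · simp only [h, if_true, ih]
          · have h' : hd.1 ∉ defined_modules := by simpa using h
            simp [h']
      by_cases hkw : PySem.Str.isIn keyword (PySem.Str.lower m) = true
      · simp only [hkw, if_true]
        rw [hflat]
        simp
      · simp only [Bool.not_eq_true] at hkw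
        simp only [hkw, Bool.false_eq_true, if_false]
        rw [hflat]
        simp

theorem pv_foldr_push {α β : Type} (cs : List α) (p : α → Prop) [DecidablePred p]
    (g : α → β) (rest : List β) :
    cs.foldr (fun ci st => if p ci then g ci :: st else st) rest
      = (cs.filter (fun ci => decide (p ci))).map g ++ rest := by
  induction cs with
  | nil => simp
  | cons hd tl ih => by_cases h : p hd <;> simp [h, ih]

theorem pv_flatMap_if {α β : Type} (cs : List α) (p : α → Prop) [DecidablePred p]
    (f : α → List β) :
    cs.flatMap (fun x => if p x then f x else [])
      = (cs.filter (fun ci => decide (p ci))).flatMap f := by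
  induction cs with
  | nil => simp
  | cons hd tl ih => by_cases h : p hd <;> simp [h, ih]

-- the central simulation lemma: B's stack loop computes the concatenation of the
-- recursive visit sequences over the stack entries, given enough fuel
theorem pv_visitLoop_eq (graph : List (String × List (String × String))) (top : String)
    (defined_modules : List String) :
    ∀ fb (stack : List (String × List (String × String) × PySem.Set String))
      (visits : List (String × List (String × String))),
      (∀ e ∈ stack, e.1 ∈ pvUniv graph top) → pvMsum graph top stack < fb →
      pvVisitLoop graph defined_modules fb stack visits
        = visits ++ stack.flatMap
            (fun e => pvVisitsRec graph defined_modules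
              (pvFree graph top e.2.2 + 1) e.1 e.2.1 e.2.2) := by
  intro fb
  induction fb with
  | zero => intro stack visits _ hM; omega
  | succ n ih =>
    intro stack visits hinv hM
    cases stack with
    | nil => simp [pvVisitLoop]
    | cons e rest =>
      obtain ⟨m, path, v⟩ := e
      have hm : m ∈ pvUniv graph top := hinv (m, path, v) (by simp)
      have hMcons : pvMsum graph top ((m, path, v) :: rest)
          = (pvE graph + 2) ^ pvFree graph top v + pvMsum graph top rest := by
        simp [pvMsum]
      have hpow1 : 1 ≤ (pvE graph + 2) ^ pvFree graph top v :=
        Nat.one_le_pow _ _ (by omega)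
      simp only [pvVisitLoop]
      by_cases hcont : PySem.Set.contains v m = true
      · -- already visited: plain pop
        simp only [hcont, if_true]
        rw [ih rest _ (fun e he => hinv e (List.mem_cons_of_mem _ he)) (by omega)]
        rw [List.flatMap_cons]
        simp only [pvVisitsRec, hcont, if_true]
        simp [List.append_assoc]
      · -- expand: push the kept children
        simp only [Bool.not_eq_true] at hcont
        have hhead : pvVisitsRec graph defined_modules (pvFree graph top v + 1) m path v
            = (m, path) :: ((PySem.Dict.mk graph).getD m []).flatMap
                (fun ci => if defined_modules.contains ci.1 = true then
                  pvVisitsRec graph defined_modules (pvFree graph top v) ci.1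
                    (path ++ [ci]) (PySem.Set.add v m) else []) := by
          simp only [pvVisitsRec, hcont, Bool.false_eq_true, if_false]
        simp only [hcont, Bool.false_eq_true, if_false]
        rw [pv_foldr_push ((PySem.Dict.mk graph).getD m [])
          (fun ci : String × String => defined_modules.contains ci.1 = true)
          (fun ci : String × String => (ci.1, path ++ [ci], PySem.Set.add v m)) rest]
        set cs := (PySem.Dict.mk graph).getD m [] with hcs
        set v2 := PySem.Set.add v m with hv2
        set P := (cs.filter (fun ci => decide (defined_modules.contains ci.1 = true))).map
          (fun ci => (ci.1, path ++ [ci], v2)) with hP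
        have hfree2 : pvFree graph top v2 < pvFree graph top v :=
          pv_free_lt graph top m v hm hcont
        have hinv' : ∀ e ∈ P ++ rest, e.1 ∈ pvUniv graph top := by
          intro e he
          rcases List.mem_append.mp he with h | h
          · simp only [hP, List.mem_map] at h
            obtain ⟨ci, hci, rfl⟩ := h
            exact pv_children_mem graph top m ci (List.mem_of_mem_filter hci)
          · exact hinv e (List.mem_cons_of_mem _ h)
        have hMP : pvMsum graph top P ≤ pvE graph * (pvE graph + 2) ^ pvFree graph top v2 := by
          have hconst : pvMsum graph top P
              = P.length * (pvE graph + 2) ^ pvFree graph top v2 := by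
            simp only [pvMsum, hP, List.map_map, Function.comp_def]
            rw [List.map_const']
            simp [List.sum_replicate, mul_comm]
          rw [hconst]
          apply Nat.mul_le_mul_right
          calc P.length ≤ cs.length := by
                simp only [hP, List.length_map]
                exact List.length_filter_le _ _
            _ ≤ pvE graph := pv_children_len graph m
        have hpow2 : 1 ≤ (pvE graph + 2) ^ pvFree graph top v2 :=
          Nat.one_le_pow _ _ (by omega)
        have hMstack' : pvMsum graph top (P ++ rest) < n := by
          have heq : pvMsum graph top (P ++ rest)
              = pvMsum graph top P + pvMsum graph top rest := by simp [pvMsum]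
          have hexp : (pvE graph + 2) * (pvE graph + 2) ^ pvFree graph top v2
              ≤ (pvE graph + 2) ^ pvFree graph top v := by
            calc (pvE graph + 2) * (pvE graph + 2) ^ pvFree graph top v2
                = (pvE graph + 2) ^ (pvFree graph top v2 + 1) := by
                  rw [Nat.pow_succ]; ring
              _ ≤ (pvE graph + 2) ^ pvFree graph top v :=
                  Nat.pow_le_pow_right (by omega) (by omega)
          have hring : pvE graph * (pvE graph + 2) ^ pvFree graph top v2
              + 2 * (pvE graph + 2) ^ pvFree graph top v2
              = (pvE graph + 2) * (pvE graph + 2) ^ pvFree graph top v2 := by ring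
          omega
        rw [ih (P ++ rest) _ hinv' hMstack']
        rw [List.flatMap_cons, hhead, List.flatMap_append]
        have hPflat : P.flatMap (fun e => pvVisitsRec graph defined_modules
            (pvFree graph top e.2.2 + 1) e.1 e.2.1 e.2.2)
            = cs.flatMap (fun ci => if defined_modules.contains ci.1 = true then
                pvVisitsRec graph defined_modules (pvFree graph top v) ci.1
                  (path ++ [ci]) v2 else []) := by
          rw [pv_flatMap_if cs (fun ci => defined_modules.contains ci.1 = true)]
          simp only [hP, List.flatMap_map]
          apply List.flatMap_congr
          intro ci hci
          exact (pv_visits_fuel graph top defined_modules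
            (pvFree graph top v2 + 1) (pvFree graph top v) ci.1 (path ++ [ci]) v2
            (pv_children_mem graph top m ci (List.mem_of_mem_filter hci))
            (by omega) (by omega))
        rw [hPflat]
        simp [List.append_assoc]

-- ===== VERDICT (by name: the statement is the Claim_ definition above) =====
theorem find_edc_paths_spec : Claim_equal_find_edc_paths := by
  intro graph top keyword defined_modules _
  unfold Spec_find_edc_paths find_edc_paths find_edc_paths_alt
  have hfe : pvFree graph top PySem.Set.empty = (pvUniv graph top).length := by
    simp [pvFree, PySem.Set.empty, PySem.Set.contains]
  rw [pv_visitLoop_eq graph top defined_modules _ _ _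
    (by intro e he
        simp only [List.mem_singleton] at he
        subst he
        exact List.mem_cons_self)
    (by have h1 : pvMsum graph top [(top, [(top, top)], PySem.Set.empty)]
          = (pvE graph + 2) ^ pvFree graph top PySem.Set.empty := by
          simp [pvMsum]
        rw [h1, hfe]
        omega)]
  rw [pv_dfsA_filterMap]
  have hfe2 : pvFree graph top ([] : PySem.Set String) = (pvUniv graph top).length := hfe
  simp [hfe2]
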